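-- pv_equiv track=rewrite | github.com/sueszli/vector-database-benchmark | dataset/python-mutated/output_init_files_test.py | _module_to_paths
-- ===== SOURCE A (Python) =====
-- def _module_to_paths(module):
--     if False:
--         i = 10
--         return i + 15
--     "Get all API __init__.py file paths for the given module.\n\n  Args:\n    module: Module to get file paths for.\n\n  Returns:\n    List of paths for the given module. For e.g. module foo.bar\n    requires 'foo/__init__.py' and 'foo/bar/__init__.py'.\n  "
--     submodules = []
--     module_segments = module.split('.')
--     for i in range(len(module_segments)):
--         submodules.append('.'.join(module_segments[:i + 1]))
--     paths = []
--     for submodule in submodules: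
--         if not submodule:
--             paths.append('__init__.py')
--             continue
--         paths.append('%s/__init__.py' % submodule.replace('.', '/'))
--     return paths
-- ===== SOURCE B (Python) =====
-- def _module_to_paths(module):
--     """Single pass: keep a running slash-joined prefix instead of re-joining
--     slices and replacing dots afterwards."""
--     paths = []
--     prefix = None
--     for seg in module.split('.'):
--         prefix = seg if prefix is None else prefix + '/' + seg
--         paths.append(prefix + '/__init__.py' if prefix else '__init__.py')
--     return paths
-- ===== Notes on version B (the rewrite author's own statement) =====
-- stated objective: simpler
-- what changed: Replaced A's two sequential loops (build every dot-joined prefix slice, then replace dots and append the suffix) by one pass that maintains the cumulative slash-joined prefix directly, eliminating the repeated join-of-slice and replace work.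
import Mathlib
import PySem

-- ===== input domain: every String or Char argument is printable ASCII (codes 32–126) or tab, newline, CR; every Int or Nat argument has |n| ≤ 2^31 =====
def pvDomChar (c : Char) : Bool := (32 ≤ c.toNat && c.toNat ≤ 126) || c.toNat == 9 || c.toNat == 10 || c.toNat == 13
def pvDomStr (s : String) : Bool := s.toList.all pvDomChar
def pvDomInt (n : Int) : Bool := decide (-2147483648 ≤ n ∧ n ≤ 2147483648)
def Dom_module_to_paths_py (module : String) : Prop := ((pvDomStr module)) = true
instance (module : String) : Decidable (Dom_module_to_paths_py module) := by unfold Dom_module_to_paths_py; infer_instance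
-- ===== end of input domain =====

-- B changes the decomposition: one pass with a running slash-joined prefix instead of A's
-- two loops (join every '.'-slice, then replace dots); objective: simpler.
-- Both ports work on List Char via PySem.Chars (string facts are proved on the list side)
-- and turn the resulting pieces into Strings at the very end.

-- ===== PORT A =====
-- module.split('.') with the literal nonempty separator '.' never raises, so the
-- Chars.splitOn form of PySem.Str.split? is exact here; xs[:i+1] with i ≥ 0 is List.take (i+1).
def module_to_paths_py (module : String) : List String :=
  let module_segments := PySem.Chars.splitOn module.toList ['.']
  let submodules := (List.range module_segments.length).foldl
      (fun sub i => sub ++ [PySem.Chars.join ['.'] (module_segments.take (i + 1))]) []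
  let paths := submodules.foldl
      (fun paths submodule =>
        if submodule.isEmpty then paths ++ ["__init__.py".toList]
        else paths ++ [PySem.Chars.replace submodule ['.'] ['/'] ++ "/__init__.py".toList]) []
  paths.map String.ofList

-- ===== PORT B =====
-- the loop body of Source B: state = (prefix : Option prefix-so-far, paths accumulated)
def pvStepB (st : Option (List Char) × List (List Char)) (seg : List Char) :
    Option (List Char) × List (List Char) :=
  let pre := match st.1 with
    | none => seg
    | some q => q ++ '/' :: seg
  (some pre,
    st.2 ++ [if pre.isEmpty then "__init__.py".toList else pre ++ "/__init__.py".toList])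

def module_to_paths_py_alt (module : String) : List String :=
  (((PySem.Chars.splitOn module.toList ['.']).foldl pvStepB (none, [])).2).map String.ofList

-- ===== PRECONDITION & SPEC =====
def Spec_module_to_paths_py (module : String) (out : List String) : Prop := out = module_to_paths_py_alt module
instance (module : String) (out : List String) : Decidable (Spec_module_to_paths_py module out) := by unfold Spec_module_to_paths_py; infer_instance

-- ===== CLAIM (what is proved, stated in full; the proofs are below) =====
def Claim_equal_module_to_paths_py : Prop := ∀ (module : String), Dom_module_to_paths_py module → Spec_module_to_paths_py module (module_to_paths_py module)

-- ===== LEMMAS AND PROOFS =====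

-- the character substitution performed by submodule.replace('.', '/')
def pvD2S (c : Char) : Char := if c = '.' then '/' else c

-- what A's second loop appends for one submodule
def pvConvA (s : List Char) : List Char :=
  if s.isEmpty then "__init__.py".toList
  else PySem.Chars.replace s ['.'] ['/'] ++ "/__init__.py".toList

-- what B appends for one prefix value
def pvEntryB (p : List Char) : List Char :=
  if p.isEmpty then "__init__.py".toList else p ++ "/__init__.py".toList

-- the cumulative d-joined prefixes of q followed by the elements of t
def pvScan (d : Char) (q : List Char) : List (List Char) → List (List Char)
  | [] => []
  | s :: t => (q ++ d :: s) :: pvScan d (q ++ d :: s) t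

theorem pvReplaceGo (fuel : Nat) : ∀ (l acc : List Char), l.length ≤ fuel →
    PySem.Chars.replace.go ['.'] ['/'] fuel l acc = acc.reverse ++ l.map pvD2S := by
  induction fuel with
  | zero =>
    intro l acc h
    have : l = [] := List.eq_nil_of_length_eq_zero (Nat.le_zero.mp h)
    subst this; simp [PySem.Chars.replace.go]
  | succ n ih =>
    intro l acc h
    cases l with
    | nil => simp [PySem.Chars.replace.go]
    | cons c t =>
      by_cases hc : c = '.'
      · subst hc
        simp only [PySem.Chars.replace.go, List.isPrefixOf, BEq.rfl, Bool.true_and,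
          if_pos]
        simp only [List.length_cons, List.length_nil, List.drop_succ_cons, List.drop_zero]
        rw [ih t _ (by simpa using h)]
        simp [pvD2S]
      · have hpre : (['.'] : List Char).isPrefixOf (c :: t) = false := by
          simp only [List.isPrefixOf, List.isPrefixOf_nil_left, Bool.and_true,
            beq_eq_false_iff_ne, ne_eq]
          exact fun h => hc h.symm
        simp only [PySem.Chars.replace.go, hpre, Bool.false_eq_true, if_neg,
          not_false_iff]
        rw [ih t _ (by simpa using Nat.le_of_succ_le_succ h)]
        simp [pvD2S, hc]

theorem pvReplaceEq (s : List Char) :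
    PySem.Chars.replace s ['.'] ['/'] = s.map pvD2S := by
  simp [PySem.Chars.replace, pvReplaceGo s.length s [] (le_refl _)]

theorem pvMapD2S_id (s : List Char) (h : '.' ∉ s) : s.map pvD2S = s := by
  induction s with
  | nil => simp
  | cons c t ih =>
    have hc : c ≠ '.' := fun hh => h (by simp [hh])
    simp only [List.map_cons, ih (fun hh => h (by simp [hh]))]
    simp [pvD2S, hc]

-- merging the head pair of a joined list
theorem pvJoinMerge (d : Char) (q s : List Char) (xs : List (List Char)) :
    PySem.Chars.join [d] (q :: s :: xs) = PySem.Chars.join [d] ((q ++ d :: s) :: xs) := by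
  cases xs with
  | nil => simp [PySem.Chars.join_cons_cons, PySem.Chars.join_singleton]
  | cons y ys => simp [PySem.Chars.join_cons_cons]

-- A's first loop (in map-over-range form) computes the d-joined prefix scan
theorem pvMapRangeScan (d : Char) (t : List (List Char)) : ∀ (q : List Char),
    (List.range t.length).map (fun i => PySem.Chars.join [d] (q :: t.take (i + 1)))
      = pvScan d q t := by
  induction t with
  | nil => intro q; simp [pvScan]
  | cons s t ih =>
    intro q
    rw [List.length_cons, List.range_succ_eq_map, List.map_cons, List.map_map]
    have h0 : PySem.Chars.join [d] (q :: (s :: t).take (0 + 1)) = q ++ d :: s := by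
      simp [PySem.Chars.join_cons_cons, PySem.Chars.join_singleton]
    have h1 : ((fun i => PySem.Chars.join [d] (q :: (s :: t).take (i + 1))) ∘ Nat.succ)
        = fun i => PySem.Chars.join [d] ((q ++ d :: s) :: t.take (i + 1)) := by
      funext i
      simp only [Function.comp_apply, List.take_succ_cons, ← pvJoinMerge]
    rw [h0, h1, ih (q ++ d :: s)]
    rfl

-- B's fold, after the first segment, appends pvEntryB of each slash-scanned prefix
theorem pvFoldB (t : List (List Char)) : ∀ (q : List Char) (acc : List (List Char)),
    (t.foldl pvStepB (some q, acc)).2 = acc ++ (pvScan '/' q t).map pvEntryB := by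
  induction t with
  | nil => intro q acc; simp [pvScan]
  | cons s t ih =>
    intro q acc
    simp only [List.foldl_cons, pvStepB, pvScan, List.map_cons]
    rw [ih]
    simp [pvEntryB]

-- scanning with the slash separator is the pvD2S image of scanning with the dot, for dot-free segments
theorem pvScanRel (t : List (List Char)) : ∀ (q : List Char), (∀ s ∈ t, '.' ∉ s) →
    pvScan '/' (q.map pvD2S) t = (pvScan '.' q t).map (List.map pvD2S) := by
  induction t with
  | nil => intro q _; simp [pvScan]
  | cons s t ih =>
    intro q h
    have hs : s.map pvD2S = s := pvMapD2S_id s (h s (by simp))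
    have hq : (q ++ '.' :: s).map pvD2S = q.map pvD2S ++ '/' :: s := by
      simp [pvD2S, hs]
    simp only [pvScan, List.map_cons, ← hq]
    rw [ih (q ++ '.' :: s) (fun x hx => h x (by simp [hx]))]

theorem pvConvA_eq (s : List Char) : pvConvA s = pvEntryB (s.map pvD2S) := by
  simp only [pvConvA, pvEntryB, pvReplaceEq, List.isEmpty_map]

theorem pvSplitGoNoDot (c : Char) (fuel : Nat) :
    ∀ (l cur : List Char) (acc : List (List Char)), l.length < fuel →
    (∀ p ∈ acc, c ∉ p) → c ∉ cur →
    ∀ p ∈ PySem.Chars.splitOn.go [c] fuel l cur acc, c ∉ p := by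
  induction fuel with
  | zero => intro l cur acc h; exact absurd h (Nat.not_lt_zero _)
  | succ n ih =>
    intro l cur acc hlen hacc hcur p hp
    cases l with
    | nil =>
      simp only [PySem.Chars.splitOn.go] at hp
      rw [List.mem_reverse, List.mem_cons] at hp
      rcases hp with h1 | h1
      · subst h1; simpa using hcur
      · exact hacc p h1
    | cons x t =>
      by_cases hx : x = c
      · subst hx
        simp only [PySem.Chars.splitOn.go, List.isPrefixOf, BEq.rfl, Bool.true_and,
          if_pos, List.length_cons, List.drop_succ_cons] at hp
        exact ih t [] (cur.reverse :: acc) (by simpa using hlen)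
          (by intro q hq
              rcases List.mem_cons.mp hq with h1 | h1
              · subst h1; simpa using hcur
              · exact hacc q h1)
          (by simp) p hp
      · simp only [PySem.Chars.splitOn.go, List.isPrefixOf, Bool.and_true] at hp
        rw [if_neg (by simp; exact fun h => absurd h.symm hx)] at hp
        exact ih t (x :: cur) acc (by simpa using Nat.lt_of_succ_lt_succ hlen) hacc
          (by simp [hcur]; exact fun h => hx h.symm) p hp

theorem pvSplitGoNe (sep : List Char) (fuel : Nat) :
    ∀ (l cur : List Char) (acc : List (List Char)),
    PySem.Chars.splitOn.go sep fuel l cur acc ≠ [] := by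
  induction fuel with
  | zero => intro l cur acc; simp [PySem.Chars.splitOn.go]
  | succ n ih =>
    intro l cur acc
    cases l with
    | nil => simp [PySem.Chars.splitOn.go]
    | cons x t =>
      simp only [PySem.Chars.splitOn.go]
      split
      · exact ih _ _ _
      · exact ih _ _ _

theorem pvSplitNoDot (s : List Char) :
    ∀ p ∈ PySem.Chars.splitOn s ['.'], '.' ∉ p := by
  intro p hp
  exact pvSplitGoNoDot '.' (s.length + 1) s [] [] (by omega) (by simp) (by simp) p hp

theorem pvSplitNe (s : List Char) : PySem.Chars.splitOn s ['.'] ≠ [] :=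
  pvSplitGoNe ['.'] (s.length + 1) s [] []

-- ===== VERDICT (by name: the statement is the Claim_ definition above) =====
theorem module_to_paths_py_spec : Claim_equal_module_to_paths_py := by
  intro module _
  unfold Spec_module_to_paths_py module_to_paths_py module_to_paths_py_alt
  obtain ⟨s0, t, hst⟩ := List.exists_cons_of_ne_nil (pvSplitNe module.toList)
  have hnd : ∀ p ∈ s0 :: t, '.' ∉ p := hst ▸ pvSplitNoDot module.toList
  rw [hst]
  -- A's second loop in map form
  have hsecond : ∀ (l : List (List Char)),
      l.foldl (fun paths submodule =>
        if submodule.isEmpty then paths ++ ["__init__.py".toList]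
        else paths ++ [PySem.Chars.replace submodule ['.'] ['/'] ++ "/__init__.py".toList]) []
      = l.map pvConvA := by
    intro l
    have hf : (fun (paths : List (List Char)) submodule =>
        if submodule.isEmpty then paths ++ ["__init__.py".toList]
        else paths ++ [PySem.Chars.replace submodule ['.'] ['/'] ++ "/__init__.py".toList])
        = fun paths submodule => paths ++ [pvConvA submodule] := by
      funext a s
      by_cases h : s.isEmpty <;> simp [pvConvA, h]
    rw [hf, PySem.List.foldl_append_singleton_eq_map]
    simp
  simp only [PySem.List.foldl_append_singleton_eq_map, List.nil_append, hsecond]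
  -- A's first loop: head s0 then the '.'-scan
  have hA : (List.range (s0 :: t).length).map
      (fun i => PySem.Chars.join ['.'] ((s0 :: t).take (i + 1)))
      = s0 :: pvScan '.' s0 t := by
    rw [List.length_cons, List.range_succ_eq_map, List.map_cons, List.map_map]
    have h0 : PySem.Chars.join ['.'] ((s0 :: t).take (0 + 1)) = s0 := by
      simp [PySem.Chars.join_singleton]
    have h1 : ((fun i => PySem.Chars.join ['.'] ((s0 :: t).take (i + 1))) ∘ Nat.succ)
        = fun i => PySem.Chars.join ['.'] (s0 :: t.take (i + 1)) := by
      funext i; simp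
    rw [h0, h1, pvMapRangeScan '.' t s0]
  rw [hA]
  -- B's fold: first step then pvFoldB
  have hB : ((s0 :: t).foldl pvStepB (none, [])).2
      = pvEntryB s0 :: (pvScan '/' s0 t).map pvEntryB := by
    simp only [List.foldl_cons, pvStepB]
    rw [pvFoldB t s0]
    simp [pvEntryB]
  rw [hB]
  -- pointwise agreement
  have hs0 : s0.map pvD2S = s0 := pvMapD2S_id s0 (hnd s0 (by simp))
  have htail : (pvScan '.' s0 t).map pvConvA = (pvScan '/' s0 t).map pvEntryB := by
    have : pvScan '/' s0 t = (pvScan '.' s0 t).map (List.map pvD2S) := by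
      conv_lhs => rw [← hs0]
      exact pvScanRel t s0 (fun x hx => hnd x (by simp [hx]))
    rw [this, List.map_map]
    exact List.map_congr_left (fun x _ => by simp [pvConvA_eq])
  have hhead : pvConvA s0 = pvEntryB s0 := by rw [pvConvA_eq, hs0]
  simp [List.map_cons, hhead, htail]
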